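-- pv_equiv track=rewrite | github.com/SiddheshP1996/GFG-POTD-Daily | 2024/06 GFG-POTD-Daily-June-2024/26 Coverage-Of-All-Zeros-In-A-Binary-Matrix.py | findCoverage
-- ===== SOURCE A (Python) =====
-- def findCoverage(matrix):
--     # Code here
--     countOne=0
--     n = len(matrix)
--     m = len(matrix[0])
--     for i in range(n):
--         for j in range(m):
--             if matrix[i][j] == 0:
--                 if(i - 1 >= 0 and matrix[i - 1][j] == 1):
--                     countOne += 1
--                 if(i + 1 < n and matrix[i + 1][j] == 1):
--                     countOne += 1
--                 if(j - 1 >= 0 and matrix[i][j - 1] == 1):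
--                     countOne += 1
--                 if(j + 1 < m and matrix[i][j + 1] == 1):
--                     countOne += 1
--     return countOne
-- ===== SOURCE B (Python) =====
-- def findCoverage(matrix):
--     m = len(matrix[0])
--     rows = [row[:m] for row in matrix]
--     cols = [list(col) for col in zip(*rows)]
--
--     def seams(lines):
--         return sum(1 for line in lines for a, b in zip(line, line[1:]) if {a, b} == {0, 1})
--
--     return seams(rows) + seams(cols)
-- ===== Notes on version B (the rewrite author's own statement) =====
-- stated objective: alternative
-- what changed: B never inspects a cell's neighbours by index: it trims rows to the first row's width, builds the column lists by transposition (zip(*rows)), and counts adjacent {0,1} pairs along each row and each column with zip(line, line[1:]) in two staged passes.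
import Mathlib
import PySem

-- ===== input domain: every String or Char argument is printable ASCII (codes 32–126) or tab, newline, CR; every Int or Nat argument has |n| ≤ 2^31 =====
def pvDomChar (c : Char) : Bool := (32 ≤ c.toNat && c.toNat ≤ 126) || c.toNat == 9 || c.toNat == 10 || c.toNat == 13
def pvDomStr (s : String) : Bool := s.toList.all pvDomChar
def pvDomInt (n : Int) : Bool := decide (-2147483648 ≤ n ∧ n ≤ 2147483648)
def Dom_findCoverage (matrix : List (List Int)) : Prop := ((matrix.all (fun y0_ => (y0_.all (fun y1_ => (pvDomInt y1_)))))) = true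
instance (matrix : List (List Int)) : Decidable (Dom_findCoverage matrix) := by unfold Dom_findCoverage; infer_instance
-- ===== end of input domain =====

-- B trims rows to the first row's width, builds the columns by transposition, and counts
-- adjacent {0,1} pairs along each row and column with zip(line, line[1:]); alternative
-- decomposition (no per-cell neighbour checks), same O(n*m) cost.

-- ===== PORT A =====
def findCoverage (matrix : List (List Int)) : Int :=
  let countOne : Int := 0
  let n : Int := matrix.length
  let m : Int := (PySem.List.pyGetD matrix 0 []).length
  (PySem.List.pyRange 0 n 1).foldl (fun acc i =>
    (PySem.List.pyRange 0 m 1).foldl (fun acc j =>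
      if PySem.List.pyGetD (PySem.List.pyGetD matrix i []) j 0 = 0 then
        let acc := if 0 ≤ i - 1 ∧ PySem.List.pyGetD (PySem.List.pyGetD matrix (i - 1) []) j 0 = 1 then acc + 1 else acc
        let acc := if i + 1 < n ∧ PySem.List.pyGetD (PySem.List.pyGetD matrix (i + 1) []) j 0 = 1 then acc + 1 else acc
        let acc := if 0 ≤ j - 1 ∧ PySem.List.pyGetD (PySem.List.pyGetD matrix i []) (j - 1) 0 = 1 then acc + 1 else acc
        let acc := if j + 1 < m ∧ PySem.List.pyGetD (PySem.List.pyGetD matrix i []) (j + 1) 0 = 1 then acc + 1 else acc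
        acc
      else acc) acc) countOne

-- ===== PORT B =====
-- Python's  {a, b} == {0, 1}  on ints: exactly "one of a,b is 0 and the other is 1"
def pvPairSeam (p : Int × Int) : Bool := (p.1 == 0 && p.2 == 1) || (p.1 == 1 && p.2 == 0)

-- zip(*rows): columns of the row list, truncated (as Python's zip) to the shortest row
def pvZipStar (rows : List (List Int)) : List (List Int) :=
  match rows with
  | [] => []
  | r :: rs =>
    if r.isEmpty || rs.any (fun x => x.isEmpty) then []
    else (r.headD 0 :: rs.map (fun x => x.headD 0)) :: pvZipStar (r.tail :: rs.map (fun x => x.tail))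
  termination_by (rows.headD []).length
  decreasing_by
    simp only [List.headD_cons]
    have : ¬ r.isEmpty := by
      intro h; simp [h] at *
    cases r with
    | nil => simp at this
    | cons a t => simp

-- sum(1 for line in lines for a, b in zip(line, line[1:]) if {a, b} == {0, 1})
def pvSeams (lines : List (List Int)) : Int :=
  (lines.map (fun line => (((line.zip line.tail).countP pvPairSeam : Nat) : Int))).sum

def findCoverage_alt (matrix : List (List Int)) : Int :=
  let m : Int := (PySem.List.pyGetD matrix 0 []).length
  let rows := matrix.map (fun row => PySem.List.slice row none (some m))
  let cols := pvZipStar rows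
  pvSeams rows + pvSeams cols

-- ===== PRECONDITION & SPEC =====
-- Python A raises IndexError on an empty matrix (matrix[0]) and on a ragged matrix whose later
-- rows are shorter than the first row (matrix[i][j] for j < len(matrix[0])); Pre_ excludes exactly those.
def Pre_findCoverage (matrix : List (List Int)) : Prop :=
  matrix ≠ [] ∧ ∀ row ∈ matrix, (matrix.headD []).length ≤ row.length
instance (matrix : List (List Int)) : Decidable (Pre_findCoverage matrix) := by
  unfold Pre_findCoverage; infer_instance
def pvWitness_findCoverage : List (List Int) := [[0, 1], [1, 0]]

def Spec_findCoverage (matrix : List (List Int)) (out : Int) : Prop := out = findCoverage_alt matrix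
instance (matrix : List (List Int)) (out : Int) : Decidable (Spec_findCoverage matrix out) := by unfold Spec_findCoverage; infer_instance

-- ===== CLAIM (what is proved, stated in full; the proofs are below) =====
def Claim_equal_findCoverage : Prop := ∀ (matrix : List (List Int)), Dom_findCoverage matrix → Pre_findCoverage matrix → Spec_findCoverage matrix (findCoverage matrix)

-- ===== LEMMAS AND PROOFS =====

-- value of the virtual grid (0 outside), and a finite sum over range k
def pvV (M : List (List Int)) (i j : ℕ) : Int := (M.getD i []).getD j 0
def pvS (f : ℕ → Int) (k : ℕ) : Int := ((List.range k).map f).sum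

-- per-cell contribution of A, with ℕ guards
def pvTA (M : List (List Int)) (n m i j : ℕ) : Int :=
  if pvV M i j = 0 then
    (if 1 ≤ i ∧ pvV M (i - 1) j = 1 then 1 else 0) +
    (if i + 1 < n ∧ pvV M (i + 1) j = 1 then 1 else 0) +
    (if 1 ≤ j ∧ pvV M i (j - 1) = 1 then 1 else 0) +
    (if j + 1 < m ∧ pvV M i (j + 1) = 1 then 1 else 0)
  else 0

theorem pvS_congr (f g : ℕ → Int) (k : ℕ) (h : ∀ x, x < k → f x = g x) : pvS f k = pvS g k := by
  unfold pvS
  congr 1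
  exact List.map_congr_left (fun x hx => h x (List.mem_range.mp hx))

theorem pvS_add (f g : ℕ → Int) (k : ℕ) :
    pvS (fun x => f x + g x) k = pvS f k + pvS g k := by
  unfold pvS; exact PySem.List.sum_map_add_int _ _ _

theorem pvS_zero (k : ℕ) : pvS (fun _ => (0 : Int)) k = 0 := by
  simp [pvS]

theorem pvS_succ (f : ℕ → Int) (k : ℕ) : pvS f (k + 1) = pvS f k + f k := by
  unfold pvS; rw [List.range_succ]; simp

theorem pvS_guard (P : Prop) [Decidable P] (f : ℕ → Int) (k : ℕ) :
    (if P then pvS f k else 0) = pvS (fun j => if P then f j else 0) k := by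
  by_cases h : P <;> simp [h, pvS_zero]

-- drop the last index of a guarded sum
theorem pvS_truncate (g : ℕ → Int) (m : ℕ) :
    pvS (fun j => if j + 1 < m then g j else 0) m = pvS g (m - 1) := by
  cases m with
  | zero => rfl
  | succ k =>
    unfold pvS
    rw [List.range_succ]
    simp only [List.map_append, List.sum_append, List.map_cons, List.map_nil]
    have : ∀ x ∈ List.range k, (if x + 1 < k + 1 then g x else 0) = g x := by
      intro x hx; simp [List.mem_range.mp hx]
    rw [List.map_congr_left this]
    simp

-- the index-shift: summing "value at the left/up neighbour" equals summing
-- "value here, guarded by having a right/down neighbour"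
theorem pvS_shift (f : ℕ → Int) (m : ℕ) :
    pvS (fun j => if 1 ≤ j then f (j - 1) else 0) m =
    pvS (fun j => if j + 1 < m then f j else 0) m := by
  cases m with
  | zero => rfl
  | succ k =>
    have hL : pvS (fun j => if 1 ≤ j then f (j - 1) else 0) (k + 1) = pvS f k := by
      unfold pvS
      rw [List.range_succ_eq_map, List.map_cons, List.map_map]
      simp only [List.sum_cons]
      have hpt : ∀ x ∈ List.range k,
          ((fun j => if 1 ≤ j then f (j - 1) else 0) ∘ Nat.succ) x = f x := by
        intro x _; simp
      rw [List.map_congr_left hpt]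
      simp
    rw [hL, pvS_truncate]
    simp

-- Fubini for pvS double sums
theorem pvS_comm (g : ℕ → ℕ → Int) (n m : ℕ) :
    pvS (fun i => pvS (g i) m) n = pvS (fun j => pvS (fun i => g i j) n) m := by
  induction n with
  | zero => simp [pvS]
  | succ k ih =>
    rw [pvS_succ, ih]
    rw [show (fun j => pvS (fun i => g i j) (k + 1)) = (fun j => pvS (fun i => g i j) k + g k j) from
      funext fun j => pvS_succ _ k]
    rw [pvS_add]

-- Port A as a double sum of per-cell contributions
theorem findCoverage_eq_sum (M : List (List Int)) :
    findCoverage M =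
      pvS (fun i => pvS (pvTA M M.length (M.getD 0 []).length i) (M.getD 0 []).length) M.length := by
  unfold findCoverage
  simp only [PySem.List.pyGetD_zero, PySem.List.pyRange_zero_nat, List.foldl_map]
  rw [PySem.List.foldl_congr_mem _ _
      (fun acc (i : ℕ) => acc + pvS (pvTA M M.length (M.getD 0 []).length i) (M.getD 0 []).length) _ ?_]
  · rw [PySem.List.foldl_add]
    simp [pvS]
  · intro acc i hi
    rw [PySem.List.foldl_congr_mem _ _
        (fun acc (j : ℕ) => acc + pvTA M M.length (M.getD 0 []).length i j) _ ?_]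
    · rw [PySem.List.foldl_add]; rfl
    · intro acc j hj
      have e0 : PySem.List.pyGetD (PySem.List.pyGetD M (i : Int) []) (j : Int) 0 = pvV M i j := by
        simp [PySem.List.pyGetD_natCast, pvV]
      have hup : (0 ≤ (i : Int) - 1 ∧ PySem.List.pyGetD (PySem.List.pyGetD M ((i : Int) - 1) []) (j : Int) 0 = 1)
          ↔ (1 ≤ i ∧ pvV M (i - 1) j = 1) := by
        by_cases hi1 : 1 ≤ i
        · have h1 : (i : Int) - 1 = ((i - 1 : ℕ) : Int) := by omega
          rw [h1]
          simp only [PySem.List.pyGetD_natCast, pvV]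
          constructor
          · rintro ⟨_, h⟩; exact ⟨hi1, h⟩
          · rintro ⟨_, h⟩; exact ⟨Int.natCast_nonneg _, h⟩
        · have hi0 : i = 0 := by omega
          subst hi0
          constructor
          · rintro ⟨h0, _⟩; exact absurd h0 (by norm_num)
          · rintro ⟨h0, _⟩; omega
      have hdn : ((i : Int) + 1 < (M.length : Int) ∧ PySem.List.pyGetD (PySem.List.pyGetD M ((i : Int) + 1) []) (j : Int) 0 = 1)
          ↔ (i + 1 < M.length ∧ pvV M (i + 1) j = 1) := by
        have h1 : (i : Int) + 1 = ((i + 1 : ℕ) : Int) := by omega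
        rw [h1]
        simp only [PySem.List.pyGetD_natCast, pvV]
        constructor
        · rintro ⟨h0, h⟩; exact ⟨by omega, h⟩
        · rintro ⟨h0, h⟩; exact ⟨by omega, h⟩
      have hlf : (0 ≤ (j : Int) - 1 ∧ PySem.List.pyGetD (PySem.List.pyGetD M (i : Int) []) ((j : Int) - 1) 0 = 1)
          ↔ (1 ≤ j ∧ pvV M i (j - 1) = 1) := by
        by_cases hj1 : 1 ≤ j
        · have h1 : (j : Int) - 1 = ((j - 1 : ℕ) : Int) := by omega
          rw [h1]
          simp only [PySem.List.pyGetD_natCast, pvV]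
          constructor
          · rintro ⟨_, h⟩; exact ⟨hj1, h⟩
          · rintro ⟨_, h⟩; exact ⟨Int.natCast_nonneg _, h⟩
        · have hj0 : j = 0 := by omega
          subst hj0
          constructor
          · rintro ⟨h0, _⟩; exact absurd h0 (by norm_num)
          · rintro ⟨h0, _⟩; omega
      have hrt : ((j : Int) + 1 < ((M.getD 0 []).length : Int) ∧ PySem.List.pyGetD (PySem.List.pyGetD M (i : Int) []) ((j : Int) + 1) 0 = 1)
          ↔ (j + 1 < (M.getD 0 []).length ∧ pvV M i (j + 1) = 1) := by
        have h1 : (j : Int) + 1 = ((j + 1 : ℕ) : Int) := by omega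
        rw [h1]
        simp only [PySem.List.pyGetD_natCast, pvV]
        constructor
        · rintro ⟨h0, h⟩; exact ⟨by omega, h⟩
        · rintro ⟨h0, h⟩; exact ⟨by omega, h⟩
      simp only [e0, hup, hdn, hlf, hrt, pvTA]
      split_ifs <;> ring

-- the four edge-indicator families
def pvUp (M : List (List Int)) (i j : ℕ) : Int := if 1 ≤ i ∧ pvV M i j = 0 ∧ pvV M (i - 1) j = 1 then 1 else 0
def pvDn (M : List (List Int)) (n : ℕ) (i j : ℕ) : Int := if i + 1 < n ∧ pvV M i j = 0 ∧ pvV M (i + 1) j = 1 then 1 else 0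
def pvLf (M : List (List Int)) (i j : ℕ) : Int := if 1 ≤ j ∧ pvV M i j = 0 ∧ pvV M i (j - 1) = 1 then 1 else 0
def pvRt (M : List (List Int)) (m : ℕ) (i j : ℕ) : Int := if j + 1 < m ∧ pvV M i j = 0 ∧ pvV M i (j + 1) = 1 then 1 else 0
def pvRt' (M : List (List Int)) (m : ℕ) (i j : ℕ) : Int := if j + 1 < m ∧ pvV M i j = 1 ∧ pvV M i (j + 1) = 0 then 1 else 0
def pvDn' (M : List (List Int)) (n : ℕ) (i j : ℕ) : Int := if i + 1 < n ∧ pvV M i j = 1 ∧ pvV M (i + 1) j = 0 then 1 else 0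

theorem pvTA_split (M : List (List Int)) (n m i j : ℕ) :
    pvTA M n m i j = pvUp M i j + pvDn M n i j + pvLf M i j + pvRt M m i j := by
  unfold pvTA pvUp pvDn pvLf pvRt
  by_cases hz : pvV M i j = 0 <;> simp [hz]

-- helper families for the two shift arguments
def pvF (M : List (List Int)) (i : ℕ) : ℕ → Int :=
  fun j => if pvV M i (j + 1) = 0 ∧ pvV M i j = 1 then 1 else 0
def pvRow (M : List (List Int)) (m : ℕ) : ℕ → Int :=
  fun i => pvS (fun j => if pvV M (i + 1) j = 0 ∧ pvV M i j = 1 then 1 else 0) m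

-- left-neighbour indicators re-summed as right-neighbour indicators with 0/1 swapped
theorem pvLf_row (M : List (List Int)) (m i : ℕ) :
    pvS (pvLf M i) m = pvS (pvRt' M m i) m := by
  have step1 : ∀ j, j < m → pvLf M i j = (fun j => if 1 ≤ j then pvF M i (j - 1) else 0) j := by
    intro j hj
    unfold pvLf pvF
    by_cases hj1 : 1 ≤ j
    · have hsub : j - 1 + 1 = j := by omega
      simp only [hsub]
      split_ifs <;> omega
    · simp [hj1]
  rw [pvS_congr _ _ _ step1, pvS_shift (pvF M i) m]
  apply pvS_congr
  intro j hj
  unfold pvF pvRt'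
  split_ifs <;> omega

-- up-neighbour indicators re-summed as down-neighbour indicators with 0/1 swapped
theorem pvUp_total (M : List (List Int)) (n m : ℕ) :
    pvS (fun i => pvS (pvUp M i) m) n = pvS (fun i => pvS (pvDn' M n i) m) n := by
  have step1 : ∀ i, i < n →
      pvS (pvUp M i) m = (fun i => if 1 ≤ i then pvRow M m (i - 1) else 0) i := by
    intro i hi
    by_cases hi1 : 1 ≤ i
    · have hsub : i - 1 + 1 = i := by omega
      simp only [hi1, if_pos, pvRow, hsub]
      apply pvS_congr
      intro j hj
      unfold pvUp
      split_ifs <;> omega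
    · have hi0 : i = 0 := by omega
      simp only [hi0]
      simp
      rw [← pvS_zero m]
      apply pvS_congr
      intro j hj
      simp [pvUp]
  rw [pvS_congr _ _ _ step1, pvS_shift (pvRow M m) n]
  apply pvS_congr
  intro i hi
  unfold pvRow
  rw [pvS_guard]
  apply pvS_congr
  intro j hj
  unfold pvDn'
  split_ifs <;> omega

-- ========= B-side lemmas =========

theorem pv_getD_succ_tail (l : List Int) (j : ℕ) (d : Int) :
    l.getD (j + 1) d = l.tail.getD j d := by
  cases l <;> rfl

theorem pv_getD_take (l : List Int) (j m : ℕ) (h : j < m) :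
    (l.take m).getD j 0 = l.getD j 0 := by
  induction l generalizing j m with
  | nil => simp
  | cons a t ih =>
    cases m with
    | zero => omega
    | succ k =>
      cases j with
      | zero => rfl
      | succ j' => simpa using ih j' k (by omega)

theorem pv_getD_map_getD {α β : Type} [Inhabited β] (l : List α) (g : α → β) (i : ℕ) (d : α) (d' : β)
    (h : i < l.length) : (l.map g).getD i d' = g (l.getD i d) := by
  induction l generalizing i with
  | nil => simp at h
  | cons a t ih =>
    cases i with
    | zero => rfl
    | succ i' => simpa using ih i' (by simpa using h)

-- any list, written as a map over its index range
theorem pv_map_eq_range_map {α : Type} (l : List α) (h : α → Int) (d : α) :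
    l.map h = (List.range l.length).map (fun i => h (l.getD i d)) := by
  induction l with
  | nil => rfl
  | cons a t ih =>
    simp only [List.map_cons, List.length_cons, List.range_succ_eq_map, List.map_map]
    congr 1

-- zip(line, line[1:]) as the indexed list of adjacent pairs
theorem pv_zip_tail_eq (L : List Int) :
    L.zip L.tail = (List.range (L.length - 1)).map (fun j => (L.getD j 0, L.getD (j + 1) 0)) := by
  induction L with
  | nil => rfl
  | cons a t ih =>
    cases t with
    | nil => rfl
    | cons b t' =>
      simp only [List.tail_cons, List.zip_cons_cons, List.length_cons, Nat.add_sub_cancel] at ih ⊢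
      rw [ih, List.range_succ_eq_map, List.map_cons, List.map_map]
      congr 1

-- countP over an indexed map, as a 0/1 pvS
theorem pv_countP_range_map {α : Type} (f : ℕ → α) (q : α → Bool) (k : ℕ) :
    (((List.range k).map f).countP q : Int) = pvS (fun j => if q (f j) = true then 1 else 0) k := by
  induction k with
  | zero => rfl
  | succ k' ih =>
    rw [List.range_succ, List.map_append, List.countP_append, pvS_succ, ← ih]
    simp only [List.map_cons, List.map_nil, List.countP_cons, List.countP_nil]
    by_cases hq : q (f k') = true
    · simp [hq]
    · simp [hq]

-- adjacent-pair count of one line of length len, as a guarded pvS over len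
theorem pv_seamline (L : List Int) (len : ℕ) (hlen : L.length = len) :
    (((L.zip L.tail).countP pvPairSeam : Nat) : Int)
      = pvS (fun j => if j + 1 < len ∧ pvPairSeam (L.getD j 0, L.getD (j + 1) 0) = true then 1 else 0) len := by
  rw [pv_zip_tail_eq, pv_countP_range_map, hlen]
  rw [show (fun j => if j + 1 < len ∧ pvPairSeam (L.getD j 0, L.getD (j + 1) 0) = true then 1 else 0)
      = (fun j => if j + 1 < len then (if pvPairSeam (L.getD j 0, L.getD (j + 1) 0) = true then (1:Int) else 0) else 0) from
    funext fun j => by split_ifs <;> simp_all]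
  rw [pvS_truncate]

-- pvZipStar on a nonempty rectangular row list is the list of columns
theorem pv_zipStar_eq (m : ℕ) (rows : List (List Int)) (hne : rows ≠ [])
    (hlen : ∀ r ∈ rows, r.length = m) :
    pvZipStar rows = (List.range m).map (fun j => rows.map (fun r => r.getD j 0)) := by
  induction m generalizing rows with
  | zero =>
    cases rows with
    | nil => simp at hne
    | cons r rs =>
      have hre : r.isEmpty = true := by
        have := hlen r List.mem_cons_self
        cases r
        · rfl
        · simp at this
      unfold pvZipStar
      simp [hre]
  | succ k ih =>
    cases rows with
    | nil => simp at hne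
    | cons r rs =>
      have hr : r.length = k + 1 := hlen r List.mem_cons_self
      have hre : r.isEmpty = false := by
        cases r
        · simp at hr
        · rfl
      have hrs : rs.any (fun x => x.isEmpty) = false := by
        simp only [List.any_eq_false]
        intro x hx
        have hlx := hlen x (List.mem_cons_of_mem _ hx)
        cases x
        · simp at hlx
        · simp
      unfold pvZipStar
      rw [if_neg (by simp [hre, hrs])]
      have htails : ∀ x ∈ (r.tail :: rs.map (fun x => x.tail)), x.length = k := by
        intro x hx
        rcases List.mem_cons.mp hx with h | h
        · subst h; simp [hr]
        · rcases List.mem_map.mp h with ⟨y, hy, rfl⟩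
          have := hlen y (List.mem_cons_of_mem _ hy)
          simp [this]
      rw [ih _ (by simp) htails]
      rw [List.range_succ_eq_map, List.map_cons, List.map_map]
      congr 1
      · -- head column: headD = getD 0
        simp only [List.map_cons]
        congr 1
        · cases r
          · simp at hr
          · rfl
        · apply List.map_congr_left
          intro x _
          cases x <;> rfl
      · apply List.map_congr_left
        intro j _
        simp only [Function.comp]
        rw [List.map_cons, List.map_map]
        congr 1
        · exact (pv_getD_succ_tail r j 0).symm
        · apply List.map_congr_left
          intro x _
          exact (pv_getD_succ_tail x j 0).symm

-- the boolean seam test, as the two disjoint indicators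
theorem pv_seam_split (P : Prop) [Decidable P] (a b : Int) :
    (if P ∧ pvPairSeam (a, b) = true then (1:Int) else 0)
      = (if P ∧ a = 0 ∧ b = 1 then (1:Int) else 0) + (if P ∧ a = 1 ∧ b = 0 then (1:Int) else 0) := by
  by_cases hP : P
  · simp only [hP, true_and, pvPairSeam, Bool.or_eq_true, Bool.and_eq_true, beq_iff_eq]
    split_ifs <;> omega
  · simp [hP]

-- Port B as a double sum of the edge indicators
theorem findCoverage_alt_eq_sum (M : List (List Int)) (hne : M ≠ [])
    (hwide : ∀ row ∈ M, (M.headD []).length ≤ row.length) :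
    findCoverage_alt M =
      pvS (fun i => pvS (fun j => (pvRt M (M.getD 0 []).length i j + pvRt' M (M.getD 0 []).length i j)
            + (pvDn M M.length i j + pvDn' M M.length i j)) (M.getD 0 []).length) M.length := by
  set n := M.length with hn
  set m := (M.getD 0 []).length with hm
  have hhead : M.headD [] = M.getD 0 [] := by cases M <;> rfl
  have hwide' : ∀ row ∈ M, m ≤ row.length := by
    intro row hrow; rw [hm, ← hhead]; exact hwide row hrow
  unfold findCoverage_alt
  simp only [PySem.List.pyGetD_zero]
  have hslice : (M.map fun row => PySem.List.slice row none (some ((M.getD 0 []).length : Int)))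
      = M.map (fun row => row.take m) := by
    apply List.map_congr_left
    intro row _
    exact PySem.List.slice_to_natCast row m
  rw [hslice]
  set rows := M.map (fun row => row.take m) with hrows
  have hrowlen : ∀ r ∈ rows, r.length = m := by
    intro r hr
    rcases List.mem_map.mp hr with ⟨row, hrow, rfl⟩
    simp [List.length_take, Nat.min_eq_left (hwide' row hrow)]
  have hrowsne : rows ≠ [] := by
    rw [hrows]; simpa using hne
  have hrowslen : rows.length = n := by simp [hrows, hn]
  -- value of a trimmed row
  have hval : ∀ i j, i < n → j < m → (rows.getD i []).getD j 0 = pvV M i j := by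
    intro i j hi hj
    rw [hrows, pv_getD_map_getD M _ i [] [] (by omega)]
    rw [pv_getD_take _ _ _ hj]
    rfl
  -- row seams
  have hrowseams : pvSeams rows
      = pvS (fun i => pvS (fun j => pvRt M m i j + pvRt' M m i j) m) n := by
    unfold pvSeams
    rw [pv_map_eq_range_map rows _ [], hrowslen]
    rw [show ∀ g : ℕ → Int, ((List.range n).map g).sum = pvS g n from fun _ => rfl]
    apply pvS_congr
    intro i hi
    have hmem : rows.getD i [] ∈ rows := by
      rw [List.getD_eq_getElem rows [] (by omega)]
      exact List.getElem_mem (by omega)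
    rw [pv_seamline (rows.getD i []) m (hrowlen _ hmem)]
    apply pvS_congr
    intro j hj
    rw [pv_seam_split (j + 1 < m)]
    by_cases hj1 : j + 1 < m
    · rw [hval i j hi hj, hval i (j + 1) hi hj1]
      unfold pvRt pvRt'
      rfl
    · unfold pvRt pvRt'
      simp [hj1]
  -- column seams
  have hcols : pvZipStar rows = (List.range m).map (fun j => rows.map (fun r => r.getD j 0)) :=
    pv_zipStar_eq m rows hrowsne hrowlen
  have hcolseams : pvSeams (pvZipStar rows)
      = pvS (fun i => pvS (fun j => pvDn M n i j + pvDn' M n i j) m) n := by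
    rw [hcols]
    unfold pvSeams
    rw [List.map_map]
    rw [show ∀ g : ℕ → Int, ((List.range m).map g).sum = pvS g m from fun _ => rfl]
    rw [pvS_comm (fun i j => pvDn M n i j + pvDn' M n i j) n m]
    apply pvS_congr
    intro j hj
    simp only [Function.comp_apply]
    have hclen : (rows.map fun r => r.getD j 0).length = n := by simp [hrowslen]
    rw [pv_seamline _ n hclen]
    apply pvS_congr
    intro i hi
    have hv1 : (rows.map fun r => r.getD j 0).getD i 0 = pvV M i j := by
      rw [pv_getD_map_getD rows _ i [] 0 (by omega)]
      exact hval i j hi hj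
    rw [pv_seam_split (i + 1 < n)]
    by_cases hi1 : i + 1 < n
    · have hv2 : (rows.map fun r => r.getD j 0).getD (i + 1) 0 = pvV M (i + 1) j := by
        rw [pv_getD_map_getD rows _ (i + 1) [] 0 (by omega)]
        exact hval (i + 1) j hi1 hj
      rw [hv1, hv2]
      unfold pvDn pvDn'
      rfl
    · unfold pvDn pvDn'
      simp [hi1]
  rw [hrowseams, hcolseams,
    ← pvS_add (fun i => pvS (fun j => pvRt M m i j + pvRt' M m i j) m)
              (fun i => pvS (fun j => pvDn M n i j + pvDn' M n i j) m) n]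
  apply pvS_congr
  intro i hi
  exact (pvS_add (fun j => pvRt M m i j + pvRt' M m i j) (fun j => pvDn M n i j + pvDn' M n i j) m).symm

-- ===== VERDICT (by name: the statement is the Claim_ definition above) =====
theorem findCoverage_spec : Claim_equal_findCoverage := by
  intro M _hDom hPre
  unfold Spec_findCoverage
  obtain ⟨hne, hwide⟩ := hPre
  rw [findCoverage_eq_sum, findCoverage_alt_eq_sum M hne hwide]
  set n := M.length
  set m := (M.getD 0 []).length
  have hA : ∀ i, pvS (pvTA M n m i) m
      = pvS (pvUp M i) m + pvS (pvDn M n i) m + pvS (pvLf M i) m + pvS (pvRt M m i) m := by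
    intro i
    rw [show pvS (pvTA M n m i) m
        = pvS (fun j => pvUp M i j + pvDn M n i j + pvLf M i j + pvRt M m i j) m from
      pvS_congr _ _ _ (fun j _ => pvTA_split M n m i j)]
    rw [show (fun j => pvUp M i j + pvDn M n i j + pvLf M i j + pvRt M m i j)
        = (fun j => ((fun j => pvUp M i j + pvDn M n i j + pvLf M i j) j) + pvRt M m i j) from rfl,
      pvS_add]
    rw [show (fun j => pvUp M i j + pvDn M n i j + pvLf M i j)
        = (fun j => ((fun j => pvUp M i j + pvDn M n i j) j) + pvLf M i j) from rfl,
      pvS_add, pvS_add]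
  have hB : ∀ i, pvS (fun j => (pvRt M m i j + pvRt' M m i j) + (pvDn M n i j + pvDn' M n i j)) m
      = (pvS (pvRt M m i) m + pvS (pvRt' M m i) m) + (pvS (pvDn M n i) m + pvS (pvDn' M n i) m) := by
    intro i
    rw [show (fun j => (pvRt M m i j + pvRt' M m i j) + (pvDn M n i j + pvDn' M n i j))
        = (fun j => ((fun j => pvRt M m i j + pvRt' M m i j) j) + ((fun j => pvDn M n i j + pvDn' M n i j) j)) from rfl,
      pvS_add, pvS_add, pvS_add]
  rw [pvS_congr _ _ _ (fun i _ => hA i), pvS_congr _ _ _ (fun i _ => hB i)]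
  have expandA :
      pvS (fun i => pvS (pvUp M i) m + pvS (pvDn M n i) m + pvS (pvLf M i) m + pvS (pvRt M m i) m) n
      = pvS (fun i => pvS (pvUp M i) m) n + pvS (fun i => pvS (pvDn M n i) m) n
        + pvS (fun i => pvS (pvLf M i) m) n + pvS (fun i => pvS (pvRt M m i) m) n := by
    rw [show (fun i => pvS (pvUp M i) m + pvS (pvDn M n i) m + pvS (pvLf M i) m + pvS (pvRt M m i) m)
        = (fun i => ((fun i => pvS (pvUp M i) m + pvS (pvDn M n i) m + pvS (pvLf M i) m) i) + pvS (pvRt M m i) m) from rfl,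
      pvS_add]
    rw [show (fun i => pvS (pvUp M i) m + pvS (pvDn M n i) m + pvS (pvLf M i) m)
        = (fun i => ((fun i => pvS (pvUp M i) m + pvS (pvDn M n i) m) i) + pvS (pvLf M i) m) from rfl,
      pvS_add, pvS_add]
  have expandB :
      pvS (fun i => (pvS (pvRt M m i) m + pvS (pvRt' M m i) m) + (pvS (pvDn M n i) m + pvS (pvDn' M n i) m)) n
      = (pvS (fun i => pvS (pvRt M m i) m) n + pvS (fun i => pvS (pvRt' M m i) m) n)
        + (pvS (fun i => pvS (pvDn M n i) m) n + pvS (fun i => pvS (pvDn' M n i) m) n) := by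
    rw [show (fun i => (pvS (pvRt M m i) m + pvS (pvRt' M m i) m) + (pvS (pvDn M n i) m + pvS (pvDn' M n i) m))
        = (fun i => ((fun i => pvS (pvRt M m i) m + pvS (pvRt' M m i) m) i) + ((fun i => pvS (pvDn M n i) m + pvS (pvDn' M n i) m) i)) from rfl,
      pvS_add, pvS_add, pvS_add]
  rw [expandA, expandB]
  rw [pvS_congr _ _ _ (fun i _ => pvLf_row M m i), pvUp_total M n m]
  ring
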